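-- pv_equiv track=rewrite | github.com/ace-wu/oj | leetcode/0036-valid-sudoku.py | is_nums_valid
-- ===== SOURCE A (Python) =====
-- def is_nums_valid(num_iter):
--     num_iter = list(num_iter)
--     seen = set()
--     for n in num_iter:
--         if n == '.':
--             continue
--         if n in seen:
--             return False
--         seen.add(n)
--     return True
-- ===== SOURCE B (Python) =====
-- def is_nums_valid(num_iter):
--     vals = sorted(n for n in num_iter if n != '.')
--     return all(a != b for a, b in zip(vals, vals[1:]))
-- ===== Notes on version B (the rewrite author's own statement) =====
-- stated objective: alternative
-- what changed: Replaces A's single-pass seen-set loop with a sort-then-adjacent-scan duplicate check: sort the non-'.' values and verify no two neighbours are equal.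
import Mathlib
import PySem

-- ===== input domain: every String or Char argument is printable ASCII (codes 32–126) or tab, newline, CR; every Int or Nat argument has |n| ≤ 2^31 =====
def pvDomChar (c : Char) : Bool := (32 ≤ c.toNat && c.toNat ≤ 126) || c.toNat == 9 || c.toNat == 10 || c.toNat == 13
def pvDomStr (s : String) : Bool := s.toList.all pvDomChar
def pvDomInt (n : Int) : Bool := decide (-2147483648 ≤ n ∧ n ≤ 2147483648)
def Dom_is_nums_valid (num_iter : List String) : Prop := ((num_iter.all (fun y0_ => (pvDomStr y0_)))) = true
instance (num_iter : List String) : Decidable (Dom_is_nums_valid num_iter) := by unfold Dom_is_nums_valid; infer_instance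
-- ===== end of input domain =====

-- B replaces A's single-pass seen-set loop by sort-then-adjacent-scan duplicate detection; objective: alternative algorithm.


-- ===== PORT A =====
-- the for-loop with early 'return False', carrying the seen-set as state
def isNumsValidLoop : List String → PySem.Set String → Bool
  | [], _ => true
  | n :: rest, seen =>
    if n == "." then isNumsValidLoop rest seen
    else if PySem.Set.contains seen n then false
    else isNumsValidLoop rest (PySem.Set.add seen n)

def is_nums_valid (num_iter : List String) : Bool :=
  isNumsValidLoop num_iter PySem.Set.empty

-- ===== PORT B =====
-- vals = sorted(n for n in num_iter if n != '.'); all(a != b for a, b in zip(vals, vals[1:]))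
def is_nums_valid_alt (num_iter : List String) : Bool :=
  let vals := PySem.List.sorted (num_iter.filter (fun n => n != ".")) (fun x => x) false
  (vals.zip (vals.drop 1)).all (fun p => p.1 != p.2)

-- ===== PRECONDITION & SPEC =====
def Spec_is_nums_valid (num_iter : List String) (out : Bool) : Prop := out = is_nums_valid_alt num_iter
instance (num_iter : List String) (out : Bool) : Decidable (Spec_is_nums_valid num_iter out) := by unfold Spec_is_nums_valid; infer_instance

-- ===== CLAIM (what is proved, stated in full; the proofs are below) =====
def Claim_equal_is_nums_valid : Prop := ∀ (num_iter : List String), Dom_is_nums_valid num_iter → Spec_is_nums_valid num_iter (is_nums_valid num_iter)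

-- ===== LEMMAS AND PROOFS =====

-- A's loop returns true iff the remaining non-'.' values are duplicate-free and disjoint from the seen-set
lemma isNumsValidLoop_true_iff (xs : List String) (s : PySem.Set String) :
    isNumsValidLoop xs s = true ↔
      ((xs.filter (fun n => n != ".")).Nodup ∧
        ∀ x ∈ xs.filter (fun n => n != "."), x ∉ s) := by
  induction xs generalizing s with
  | nil => simp [isNumsValidLoop]
  | cons n rest ih =>
    by_cases hdot : n = "."
    · subst hdot
      simp [isNumsValidLoop, ih]
    · have hne : (n != ".") = true := by simp [hdot]
      rw [show List.filter (fun n => n != ".") (n :: rest) =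
          n :: List.filter (fun n => n != ".") rest from by
        simp only [List.filter_cons, hne, if_pos]]
      by_cases hm : n ∈ s
      · have : isNumsValidLoop (n :: rest) s = false := by
          simp [isNumsValidLoop, hdot, PySem.Set.contains, hm]
        rw [this]
        constructor
        · intro h; cases h
        · rintro ⟨_, hdisj⟩
          exact absurd hm (hdisj n (by simp))
      · have : isNumsValidLoop (n :: rest) s = isNumsValidLoop rest (PySem.Set.add s n) := by
          simp [isNumsValidLoop, hdot, PySem.Set.contains, hm]
        rw [this, ih]
        simp only [List.nodup_cons, List.mem_cons]
        constructor
        · rintro ⟨hnd, hdisj⟩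
          refine ⟨⟨fun hnmem => ?_, hnd⟩, ?_⟩
          · exact (hdisj n hnmem) ((PySem.Set.mem_add _ _ _).2 (Or.inr rfl))
          · rintro x (rfl | hx) hxs
            · exact hm hxs
            · exact (hdisj x hx) ((PySem.Set.mem_add _ _ _).2 (Or.inl hxs))
        · rintro ⟨⟨hnn, hnd⟩, hdisj⟩
          refine ⟨hnd, fun x hx hxadd => ?_⟩
          rcases (PySem.Set.mem_add _ _ _).1 hxadd with hxs | rfl
          · exact hdisj x (Or.inr hx) hxs
          · exact hnn hx

-- in a ≤-sorted list, "no two neighbours equal" is exactly Nodup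
lemma adj_distinct_iff_nodup (vs : List String) (hp : vs.Pairwise (· ≤ ·)) :
    ((vs.zip (vs.drop 1)).all (fun p => p.1 != p.2) = true) ↔ vs.Nodup := by
  induction vs with
  | nil => simp
  | cons a t ih =>
    cases t with
    | nil => simp
    | cons b u =>
      have hp' : (b :: u).Pairwise (· ≤ ·) := hp.tail
      have hab : a ≤ b := (List.pairwise_cons.1 hp).1 b (by simp)
      have hble : ∀ y ∈ u, b ≤ y := fun y hy => (List.pairwise_cons.1 hp').1 y hy
      have hale : ∀ y ∈ b :: u, a ≤ y := (List.pairwise_cons.1 hp).1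
      simp only [List.drop_succ_cons, List.drop_zero, List.zip_cons_cons, List.all_cons,
        Bool.and_eq_true] at *
      rw [ih hp']
      constructor
      · rintro ⟨hab2, hnd⟩
        have hanb : a ≠ b := by simpa using hab2
        refine List.nodup_cons.2 ⟨?_, hnd⟩
        intro hmem
        rcases List.mem_cons.1 hmem with rfl | hmu
        · exact hanb rfl
        · have hb : b ≤ a := hble a hmu
          exact hanb (le_antisymm hab hb)
      · intro hnd
        have h1 := List.nodup_cons.1 hnd
        refine ⟨?_, h1.2⟩
        simp only [bne_iff_ne, ne_eq]
        intro rfl_eq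
        exact h1.1 (by simp [rfl_eq])

-- ===== VERDICT (by name: the statement is the Claim_ definition above) =====
theorem is_nums_valid_spec : Claim_equal_is_nums_valid := by
  intro num_iter _
  unfold Spec_is_nums_valid is_nums_valid is_nums_valid_alt
  set vals := PySem.List.sorted (num_iter.filter (fun n => n != ".")) (fun x => x) false with hvals
  have hperm : vals.Perm (num_iter.filter (fun n => n != ".")) := PySem.List.sorted_perm _ _ _
  have hpw : vals.Pairwise (· ≤ ·) := by
    simpa using PySem.List.sorted_pairwise (num_iter.filter (fun n => n != ".")) (fun x => x)
  have hA := isNumsValidLoop_true_iff num_iter PySem.Set.empty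
  have hB := adj_distinct_iff_nodup vals hpw
  have hAnodup : isNumsValidLoop num_iter PySem.Set.empty = true ↔
      (num_iter.filter (fun n => n != ".")).Nodup := by
    rw [hA]
    simp [PySem.Set.empty]
  have : isNumsValidLoop num_iter PySem.Set.empty = true ↔
      ((vals.zip (vals.drop 1)).all (fun p => p.1 != p.2) = true) := by
    rw [hAnodup, hB, hperm.nodup_iff]
  exact (Bool.eq_iff_iff).2 this
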